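-- pv_equiv track=rewrite | github.com/gcp825/advent_of_code | 2015/python/05.py | validate_v2
-- ===== SOURCE A (Python) =====
-- def validate_v2(string,repeat_ct):
--
--     valid = False;  length = len(string); i = 0
--
--     while not valid and i < length:                    # regex alternative: re.findall(r'([a-z]{2}).*\1', string)
--         if string[i+repeat_ct:].find(string[i:i+repeat_ct]) >= 0: valid = True
--         i += 1
--
--     if valid:                                          # regex alternative: re.findall(r"([a-z]).\1", string)
--         valid = False;  i = 0
--         while not valid and i < length:
--             if string[i:i+1] == string[i+2:i+3]: valid = True
--             i += 1
--
--     return valid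
-- ===== SOURCE B (Python) =====
-- def validate_v2(string, repeat_ct):
--     # one pass keeping the first occurrence of each window in a dict, then a zip scan
--     n = len(string)
--     pair = False
--     if repeat_ct <= 0 or 2 * repeat_ct <= n:   # two disjoint copies need 2*repeat_ct chars
--         first = {}
--         for q in range(n - repeat_ct + 1):
--             w = string[q:q+repeat_ct]
--             p = first.setdefault(w, q)
--             if p != q and q - p >= repeat_ct:
--                 pair = True
--                 break
--     return pair and any(a == b for a, b in zip(string, string[2:]))
-- ===== Notes on version B (the rewrite author's own statement) =====
-- stated objective: alternative
-- what changed: Check 1 no longer re-searches the remaining suffix at every index: B makes one pass that records the first occurrence of each length-repeat_ct window in a dict (skipping the scan when two disjoint copies cannot fit) and tests the gap to that first occurrence; check 2 becomes a zip scan of the string against its shift by two; equivalence is proved on all inputs with no precondition.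
import Mathlib
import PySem

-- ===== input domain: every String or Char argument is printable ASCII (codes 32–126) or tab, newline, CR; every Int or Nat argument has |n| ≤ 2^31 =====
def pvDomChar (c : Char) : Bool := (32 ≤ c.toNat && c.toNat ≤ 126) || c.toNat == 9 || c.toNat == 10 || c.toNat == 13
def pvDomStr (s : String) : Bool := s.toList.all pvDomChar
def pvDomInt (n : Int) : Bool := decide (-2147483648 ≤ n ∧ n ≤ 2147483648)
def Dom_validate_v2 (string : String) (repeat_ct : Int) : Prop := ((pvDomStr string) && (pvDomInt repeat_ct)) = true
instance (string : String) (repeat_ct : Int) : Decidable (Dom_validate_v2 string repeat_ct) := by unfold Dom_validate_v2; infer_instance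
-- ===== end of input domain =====

-- B replaces A's rescan of the whole suffix at every index by one pass keeping the first
-- occurrence of every window in a dict, and the second index loop by a zip scan.

-- ===== PORT A =====
-- while not valid and i < length: if string[i+repeat_ct:].find(string[i:i+repeat_ct]) >= 0: valid = True
def validate_v2_loop1 (s : String) (k : Int) (length : Nat) (i : Nat) : Bool :=
  if i < length then
    if PySem.Str.find (PySem.Str.slice s (some ((i : Int) + k)) none)
        (PySem.Str.slice s (some (i : Int)) (some ((i : Int) + k))) ≥ 0 then true
    else validate_v2_loop1 s k length (i + 1)
  else false
termination_by length - i

-- while not valid and i < length: if string[i:i+1] == string[i+2:i+3]: valid = True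
def validate_v2_loop2 (s : String) (length : Nat) (i : Nat) : Bool :=
  if i < length then
    if PySem.Str.slice s (some (i : Int)) (some ((i : Int) + 1))
        == PySem.Str.slice s (some ((i : Int) + 2)) (some ((i : Int) + 3)) then true
    else validate_v2_loop2 s length (i + 1)
  else false
termination_by length - i

def validate_v2 (string : String) (repeat_ct : Int) : Bool :=
  let length := string.length
  if validate_v2_loop1 string repeat_ct length 0 then validate_v2_loop2 string length 0
  else false

-- ===== PORT B =====
-- w = string[q:q+repeat_ct]
def validate_v2_alt_window (s : String) (k : Int) (q : Int) : String :=
  PySem.Str.slice s (some q) (some (q + k))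

-- for q in range(len(string) - repeat_ct + 1): p = first.setdefault(w, q);
--   if p != q and q - p >= repeat_ct: pair = True; break
-- (ported as recursion on the running index q with upper bound N, range kept lazy)
def validate_v2_alt_loop (s : String) (k : Int) (N : Int) (q : Int)
    (first : PySem.Dict String Int) : Bool :=
  if q < N then
    let w := validate_v2_alt_window s k q
    let p := (first.get? w).getD q
    if p ≠ q ∧ q - p ≥ k then true
    else validate_v2_alt_loop s k N (q + 1) (first.setdefault w q)
  else false
termination_by (N - q).toNat
decreasing_by omega

def validate_v2_alt (string : String) (repeat_ct : Int) : Bool :=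
  let n : Int := (string.length : Int)
  -- two disjoint copies need 2*repeat_ct characters
  let pair := if repeat_ct ≤ 0 ∨ 2 * repeat_ct ≤ n then
      validate_v2_alt_loop string repeat_ct (n - repeat_ct + 1) 0 PySem.Dict.empty
    else false
  pair && (string.toList.zip (PySem.Str.slice string (some 2) none).toList).any
      (fun ab => ab.1 == ab.2)

-- ===== PRECONDITION & SPEC =====
def Spec_validate_v2 (string : String) (repeat_ct : Int) (out : Bool) : Prop := out = validate_v2_alt string repeat_ct
instance (string : String) (repeat_ct : Int) (out : Bool) : Decidable (Spec_validate_v2 string repeat_ct out) := by unfold Spec_validate_v2; infer_instance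

-- ===== CLAIM (what is proved, stated in full; the proofs are below) =====
def Claim_equal_validate_v2 : Prop := ∀ (string : String) (repeat_ct : Int), Dom_validate_v2 string repeat_ct → Spec_validate_v2 string repeat_ct (validate_v2 string repeat_ct)

-- ===== LEMMAS AND PROOFS =====

-- the window of length k' starting at j, at the List Char level
def vWnd (cs : List Char) (k' j : Nat) : List Char := (cs.drop j).take k'

-- common characterisation of check 1 for k ≥ 1: two equal windows at distance ≥ k
def vP1 (cs : List Char) (k' : Nat) : Prop :=
  ∃ p q : Nat, p < q ∧ p + k' ≤ q ∧ q + k' ≤ cs.length ∧ vWnd cs k' p = vWnd cs k' q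

-- A's inner condition at index j
def vC1 (s : String) (k : Int) (j : Nat) : Prop :=
  PySem.Str.find (PySem.Str.slice s (some ((j : Int) + k)) none)
      (PySem.Str.slice s (some (j : Int)) (some ((j : Int) + k))) ≥ 0

lemma aLoop1_iff (s : String) (k : Int) (len : Nat) :
    ∀ m i, len - i ≤ m → (validate_v2_loop1 s k len i = true ↔ ∃ j, i ≤ j ∧ j < len ∧ vC1 s k j) := by
  intro m
  induction m with
  | zero =>
    intro i h
    rw [validate_v2_loop1]
    have hi : ¬ i < len := by omega
    simp only [if_neg hi, Bool.false_eq_true, false_iff]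
    rintro ⟨j, h1, h2, _⟩; omega
  | succ m ih =>
    intro i h
    rw [validate_v2_loop1]
    by_cases hi : i < len
    · rw [if_pos hi]
      by_cases hc : vC1 s k i
      all_goals simp only [vC1] at hc
      · rw [if_pos hc]
        simp only [true_iff]
        exact ⟨i, le_refl _, hi, hc⟩
      · rw [if_neg hc, ih (i+1) (by omega)]
        constructor
        · rintro ⟨j, h1, h2, h3⟩; exact ⟨j, by omega, h2, h3⟩
        · rintro ⟨j, h1, h2, h3⟩
          refine ⟨j, ?_, h2, h3⟩
          rcases Nat.eq_or_lt_of_le h1 with he | hl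
          · exact absurd (show PySem.Str.find _ _ ≥ 0 from he ▸ h3) hc
          · omega
    · rw [if_neg hi]
      simp only [Bool.false_eq_true, false_iff]
      rintro ⟨j, h1, h2, _⟩; omega

lemma aLoop2_iff (s : String) (len : Nat) :
    ∀ m i, len - i ≤ m → (validate_v2_loop2 s len i = true ↔
      ∃ j, i ≤ j ∧ j < len ∧
        PySem.Str.slice s (some (j : Int)) (some ((j : Int) + 1))
          = PySem.Str.slice s (some ((j : Int) + 2)) (some ((j : Int) + 3))) := by
  intro m
  induction m with
  | zero =>
    intro i h
    rw [validate_v2_loop2]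
    have hi : ¬ i < len := by omega
    simp only [if_neg hi, Bool.false_eq_true, false_iff]
    rintro ⟨j, h1, h2, _⟩; omega
  | succ m ih =>
    intro i h
    rw [validate_v2_loop2]
    by_cases hi : i < len
    · rw [if_pos hi]
      by_cases hc : PySem.Str.slice s (some (i : Int)) (some ((i : Int) + 1))
          = PySem.Str.slice s (some ((i : Int) + 2)) (some ((i : Int) + 3))
      · rw [if_pos (by simpa using hc)]
        simp only [true_iff]
        exact ⟨i, le_refl _, hi, hc⟩
      · rw [if_neg (by simpa using hc), ih (i+1) (by omega)]
        constructor
        · rintro ⟨j, h1, h2, h3⟩; exact ⟨j, by omega, h2, h3⟩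
        · rintro ⟨j, h1, h2, h3⟩
          refine ⟨j, ?_, h2, h3⟩
          rcases Nat.eq_or_lt_of_le h1 with he | hl
          · exact absurd (he ▸ h3) hc
          · omega
    · rw [if_neg hi]
      simp only [Bool.false_eq_true, false_iff]
      rintro ⟨j, h1, h2, _⟩; omega

lemma window_toList (s : String) (k : Int) (q : Int) (h0 : 0 ≤ q) (hk : 0 ≤ k) :
    (validate_v2_alt_window s k q).toList = vWnd s.toList k.toNat q.toNat := by
  unfold validate_v2_alt_window vWnd
  rw [PySem.Str.toList_slice, PySem.Chars.slice_eq_listSlice,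
    PySem.List.slice_toNat _ h0 (by omega)]
  congr 1
  omega

lemma window_empty_toList (s : String) (k : Int) (q : Int)
    (h : PySem.List.clampIdx s.toList.length (q + k) ≤ PySem.List.clampIdx s.toList.length q) :
    (validate_v2_alt_window s k q).toList = [] := by
  unfold validate_v2_alt_window
  rw [PySem.Str.toList_slice, PySem.Chars.slice_eq_listSlice]
  have hl := PySem.List.length_slice s.toList q (q + k)
  exact List.eq_nil_of_length_eq_zero (by omega)

lemma vC1_iff (s : String) (k : Int) (hk : 0 ≤ k) (j : Nat) :
    vC1 s k j ↔ ∃ m : Nat, vWnd s.toList k.toNat j <+: s.toList.drop (j + k.toNat + m) := by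
  unfold vC1
  rw [ge_iff_le, PySem.Str.find_nonneg_iff]
  rw [PySem.Str.toList_slice, PySem.Str.toList_slice, PySem.Chars.slice_eq_listSlice,
    PySem.Chars.slice_eq_listSlice,
    PySem.List.slice_from _ (by omega : (0:Int) ≤ (j : Int) + k),
    PySem.List.slice_toNat _ (by omega : (0:Int) ≤ (j : Int)) (by omega)]
  have h3 : (j : Int).toNat = j := by omega
  rw [h3]
  have h1 : ((j : Int) + k).toNat = j + k.toNat := by omega
  rw [h1]
  have h2 : j + k.toNat - j = k.toNat := by omega
  rw [h2]
  rw [← PySem.Chars.isIn_iff_infix, ← PySem.Chars.exists_prefix_drop_iff_isIn]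
  constructor
  · rintro ⟨m, hm⟩
    exact ⟨m, by rw [List.drop_drop] at hm; exact hm⟩
  · rintro ⟨m, hm⟩
    exact ⟨m, by rw [List.drop_drop]; exact hm⟩

lemma exists_C1_iff_P1 (s : String) (k : Int) (hk : 1 ≤ k) :
    (∃ j, j < s.toList.length ∧ vC1 s k j) ↔ vP1 s.toList k.toNat := by
  constructor
  · rintro ⟨j, hj, hc⟩
    obtain ⟨m, hpre⟩ := (vC1_iff s k (by omega) j).mp hc
    have hlen := hpre.length_le
    have hwl : (vWnd s.toList k.toNat j).length = min k.toNat (s.toList.length - j) := by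
      simp [vWnd]
    have hdl : (List.drop (j + k.toNat + m) s.toList).length = s.toList.length - (j + k.toNat + m) := by
      simp
    rw [hwl, hdl] at hlen
    by_cases hjk : j + k.toNat ≤ s.toList.length
    · refine ⟨j, j + k.toNat + m, by omega, by omega, by omega, ?_⟩
      have hl : (vWnd s.toList k.toNat j).length = k.toNat := by rw [hwl]; omega
      rw [List.prefix_iff_eq_take] at hpre
      rw [hl] at hpre
      exact hpre
    · exfalso; omega
  · rintro ⟨p, q, h1, h2, h3, hw⟩
    refine ⟨p, by omega, ?_⟩
    rw [vC1_iff s k (by omega) p]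
    refine ⟨q - (p + k.toNat), ?_⟩
    have he : p + k.toNat + (q - (p + k.toNat)) = q := by omega
    rw [he, hw]
    exact List.take_prefix _ _

-- the dict invariant: first maps each window string to the first index where it occurs below q0
def vInv (s : String) (k : Int) (q0 : Int) (d : PySem.Dict String Int) : Prop :=
  ∀ w p, d.get? w = some p ↔
    (0 ≤ p ∧ p < q0 ∧ validate_v2_alt_window s k p = w ∧
      ∀ j : Int, 0 ≤ j → j < p → validate_v2_alt_window s k j ≠ w)

lemma vInv_empty (s : String) (k : Int) : vInv s k 0 PySem.Dict.empty := by
  intro w p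
  rw [PySem.Dict.get?_empty]
  constructor
  · rintro ⟨⟩
  · rintro ⟨a1, a2, _, _⟩; omega

lemma bLoop_iff (s : String) (k : Int) (N : Int) :
    ∀ m (q0 : Int) d, (N - q0).toNat ≤ m → 0 ≤ q0 → vInv s k q0 d →
      (validate_v2_alt_loop s k N q0 d = true ↔
        ∃ p q : Int, 0 ≤ p ∧ p < q ∧ q0 ≤ q ∧ q < N ∧ k ≤ q - p ∧
          validate_v2_alt_window s k p = validate_v2_alt_window s k q) := by
  intro m
  induction m with
  | zero =>
    intro q0 d hm h0 hInv
    rw [validate_v2_alt_loop, if_neg (by omega : ¬ q0 < N)]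
    simp only [Bool.false_eq_true, false_iff]
    rintro ⟨p, q, _, _, h3, h4, _, _⟩; omega
  | succ m ih =>
    intro q0 d hm h0 hInv
    by_cases hlt : q0 < N
    · rw [validate_v2_alt_loop, if_pos hlt]
      simp only []
      cases hget : d.get? (validate_v2_alt_window s k q0) with
      | some p =>
        obtain ⟨hp0, hplt, hwin, hmin⟩ := (hInv _ p).mp hget
        have hcont : d.contains (validate_v2_alt_window s k q0) = true := by
          rw [PySem.Dict.contains_eq_isSome_get?, hget]; rfl
        rw [PySem.Dict.setdefault_of_contains _ _ hcont]
        simp only [Option.getD_some]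
        by_cases hcond : k ≤ q0 - p
        · rw [if_pos ⟨by omega, hcond⟩]
          simp only [true_iff]
          exact ⟨p, q0, hp0, hplt, le_refl _, hlt, hcond, by rw [hwin]⟩
        · rw [if_neg (by rintro ⟨_, hk2⟩; exact hcond hk2)]
          have hInv' : vInv s k (q0 + 1) d := by
            intro w' p'
            rw [hInv w' p']
            constructor
            · rintro ⟨a1, a2, a3, a4⟩; exact ⟨a1, by omega, a3, a4⟩
            · rintro ⟨a1, a2, a3, a4⟩
              refine ⟨a1, ?_, a3, a4⟩
              rcases lt_or_eq_of_le (by omega : p' ≤ q0) with hl | he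
              · exact hl
              · exfalso
                subst he
                exact a4 p hp0 hplt (by rw [hwin, a3])
          rw [ih (q0 + 1) d (by omega) (by omega) hInv']
          constructor
          · rintro ⟨p1, q1, b1, b2, b3, b4, b5, b6⟩
            exact ⟨p1, q1, b1, b2, by omega, b4, b5, b6⟩
          · rintro ⟨p1, q1, b1, b2, b3, b4, b5, b6⟩
            refine ⟨p1, q1, b1, b2, ?_, b4, b5, b6⟩
            rcases lt_or_eq_of_le b3 with hl | he
            · omega
            · exfalso
              rw [← he] at b6
              have hge : ¬ p1 < p := fun hc => hmin p1 b1 hc b6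
              omega
      | none =>
        have hcont : d.contains (validate_v2_alt_window s k q0) = false := by
          rw [PySem.Dict.contains_eq_isSome_get?, hget]; rfl
        have hnone : ∀ j : Int, 0 ≤ j → j < q0 →
            validate_v2_alt_window s k j ≠ validate_v2_alt_window s k q0 := by
          intro j hj0 hj1 hjw
          have hQ : ∃ t : Nat, (t : Int) < q0 ∧
              validate_v2_alt_window s k (t : Int) = validate_v2_alt_window s k q0 :=
            ⟨j.toNat, by rw [Int.toNat_of_nonneg hj0]; exact ⟨hj1, hjw⟩⟩
          have hspec := Nat.find_spec hQ
          have : d.get? (validate_v2_alt_window s k q0) = some ((Nat.find hQ : Nat) : Int) := by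
            rw [hInv]
            refine ⟨by omega, hspec.1, hspec.2, ?_⟩
            intro j' hj'0 hj'lt hj'w
            have hlt' : j'.toNat < Nat.find hQ := by omega
            exact Nat.find_min hQ hlt' ⟨by rw [Int.toNat_of_nonneg hj'0]; omega,
              by rw [Int.toNat_of_nonneg hj'0]; exact hj'w⟩
          rw [hget] at this; cases this
        rw [PySem.Dict.setdefault_of_not_contains _ _ hcont]
        simp only [Option.getD_none]
        rw [if_neg (by rintro ⟨hne, _⟩; exact hne rfl)]
        have hInv' : vInv s k (q0 + 1) (d.insert (validate_v2_alt_window s k q0) q0) := by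
          intro w' p'
          rw [PySem.Dict.get?_insert]
          by_cases hww : w' = validate_v2_alt_window s k q0
          · rw [if_pos hww]
            constructor
            · rintro ⟨he⟩
              exact ⟨h0, by omega, hww ▸ rfl, hww ▸ hnone⟩
            · rintro ⟨a1, a2, a3, a4⟩
              have : p' = q0 := by
                rcases lt_or_eq_of_le (by omega : p' ≤ q0) with hl | he
                · exact absurd (hww ▸ a3) (hnone p' a1 hl)
                · exact he
              rw [this]
          · rw [if_neg hww, hInv w' p']
            constructor
            · rintro ⟨a1, a2, a3, a4⟩; exact ⟨a1, by omega, a3, a4⟩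
            · rintro ⟨a1, a2, a3, a4⟩
              refine ⟨a1, ?_, a3, a4⟩
              rcases lt_or_eq_of_le (by omega : p' ≤ q0) with hl | he
              · exact hl
              · exfalso; exact hww (by rw [← a3, he])
        rw [ih (q0 + 1) _ (by omega) (by omega) hInv']
        constructor
        · rintro ⟨p1, q1, b1, b2, b3, b4, b5, b6⟩
          exact ⟨p1, q1, b1, b2, by omega, b4, b5, b6⟩
        · rintro ⟨p1, q1, b1, b2, b3, b4, b5, b6⟩
          refine ⟨p1, q1, b1, b2, ?_, b4, b5, b6⟩
          rcases lt_or_eq_of_le b3 with hl | he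
          · omega
          · exfalso
            rw [← he] at b6
            exact hnone p1 b1 (by omega) b6
    · rw [validate_v2_alt_loop, if_neg hlt]
      simp only [Bool.false_eq_true, false_iff]
      rintro ⟨p, q, _, _, h3, h4, _, _⟩; omega

-- B's first pass, specialised to the actual call
lemma bPass_iff (s : String) (k : Int) :
    (validate_v2_alt_loop s k ((s.length : Int) - k + 1) 0 PySem.Dict.empty = true ↔
      ∃ p q : Int, 0 ≤ p ∧ p < q ∧ 0 ≤ q ∧ q < (s.length : Int) - k + 1 ∧ k ≤ q - p ∧
        validate_v2_alt_window s k p = validate_v2_alt_window s k q) := by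
  rw [bLoop_iff s k _ ((( (s.length : Int) - k + 1) - 0).toNat) 0 _ (le_refl _) (le_refl _)
    (vInv_empty s k)]

lemma bPass_iff_P1 (s : String) (k : Int) (hk : 1 ≤ k) :
    (validate_v2_alt_loop s k ((s.length : Int) - k + 1) 0 PySem.Dict.empty = true ↔
      vP1 s.toList k.toNat) := by
  rw [bPass_iff]
  have hn : s.toList.length = s.length := s.length_toList
  constructor
  · rintro ⟨p, q, a1, a2, a3, a4, a5, a6⟩
    refine ⟨p.toNat, q.toNat, by omega, by omega, by omega, ?_⟩
    have := congrArg String.toList a6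
    rwa [window_toList s k p a1 (by omega), window_toList s k q a3 (by omega)] at this
  · rintro ⟨p, q, h1, h2, h3, hw⟩
    refine ⟨(p : Int), (q : Int), by omega, by omega, by omega, by omega, by omega, ?_⟩
    apply String.toList_inj.mp
    rw [window_toList s k _ (by omega) (by omega), window_toList s k _ (by omega) (by omega)]
    simpa using hw

-- check 1 is trivially true for k ≤ 0 on a nonempty string, on both sides
lemma aPass_true_of_nonpos (s : String) (k : Int) (hk : k ≤ 0) (hn : 1 ≤ s.toList.length) :
    ∃ j, j < s.toList.length ∧ vC1 s k j := by
  refine ⟨min (-k).toNat (s.toList.length - 1), by omega, ?_⟩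
  unfold vC1
  rw [ge_iff_le, PySem.Str.find_nonneg_iff]
  have hempty : (validate_v2_alt_window s k ((min (-k).toNat (s.toList.length - 1) : Nat) : Int)).toList = [] := by
    apply window_empty_toList
    simp only [PySem.List.clampIdx]
    split_ifs <;> omega
  unfold validate_v2_alt_window at hempty
  rw [hempty]
  exact List.nil_infix

lemma bPass_true_of_nonpos (s : String) (k : Int) (hk : k ≤ 0) (hn : 1 ≤ s.toList.length) :
    validate_v2_alt_loop s k ((s.length : Int) - k + 1) 0 PySem.Dict.empty = true := by
  rw [bPass_iff]
  have hlen : s.toList.length = s.length := s.length_toList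
  rcases eq_or_lt_of_le hk with he | hlt
  · -- k = 0 : empty windows at 0 and 1
    refine ⟨0, 1, by omega, by omega, by omega, by omega, by omega, ?_⟩
    apply String.toList_inj.mp
    rw [window_empty_toList, window_empty_toList]
    all_goals simp only [PySem.List.clampIdx]
    all_goals split_ifs <;> omega
  · -- k < 0 : empty windows past the end of the string
    refine ⟨(s.length : Int), (s.length : Int) + 1, by omega, by omega, by omega, by omega,
      by omega, ?_⟩
    apply String.toList_inj.mp
    rw [window_empty_toList, window_empty_toList]
    all_goals simp only [PySem.List.clampIdx]
    all_goals split_ifs <;> omega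

lemma take_one_drop (cs : List Char) (j : Nat) (h : j < cs.length) :
    List.take 1 (cs.drop j) = [cs[j]] := by
  rw [List.drop_eq_getElem_cons h]
  rfl

lemma slice2_iff (s : String) (j : Nat) (hj : j < s.toList.length) :
    (PySem.Str.slice s (some (j : Int)) (some ((j : Int) + 1))
        = PySem.Str.slice s (some ((j : Int) + 2)) (some ((j : Int) + 3))) ↔
      (j + 2 < s.toList.length ∧ s.toList[j]? = s.toList[j + 2]?) := by
  rw [← String.toList_inj]
  rw [PySem.Str.toList_slice, PySem.Str.toList_slice, PySem.Chars.slice_eq_listSlice,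
    PySem.Chars.slice_eq_listSlice,
    PySem.List.slice_toNat _ (by omega : (0:Int) ≤ (j : Int)) (by omega),
    PySem.List.slice_toNat _ (by omega : (0:Int) ≤ (j : Int) + 2) (by omega)]
  have e1 : ((j : Int) + 1).toNat - (j : Int).toNat = 1 := by omega
  have e2 : ((j : Int) + 3).toNat - ((j : Int) + 2).toNat = 1 := by omega
  have e3 : (j : Int).toNat = j := by omega
  have e4 : ((j : Int) + 2).toNat = j + 2 := by omega
  rw [e1, e2, e3, e4, take_one_drop s.toList j hj]
  by_cases h2 : j + 2 < s.toList.length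
  · rw [take_one_drop s.toList (j + 2) h2]
    simp only [List.cons.injEq, and_true]
    constructor
    · intro h
      exact ⟨h2, by
        rw [List.getElem?_eq_getElem (by omega : j < s.toList.length),
          List.getElem?_eq_getElem h2, h]⟩
    · rintro ⟨_, h⟩
      rw [List.getElem?_eq_getElem (by omega : j < s.toList.length),
        List.getElem?_eq_getElem h2] at h
      exact Option.some_inj.mp h
  · have : List.drop (j + 2) s.toList = [] := List.drop_eq_nil_of_le (by omega)
    rw [this]
    simp only [List.take_nil]
    constructor
    · rintro ⟨⟩
    · rintro ⟨hc, _⟩; omega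

lemma aPass2_iff (s : String) :
    (validate_v2_loop2 s s.length 0 = true ↔
      ∃ j, j + 2 < s.toList.length ∧ s.toList[j]? = s.toList[j + 2]?) := by
  rw [aLoop2_iff s s.length s.length 0 (by omega)]
  have hn : s.toList.length = s.length := s.length_toList
  constructor
  · rintro ⟨j, _, hj, hsl⟩
    exact ⟨j, (slice2_iff s j (by omega)).mp hsl⟩
  · rintro ⟨j, hj, he⟩
    exact ⟨j, by omega, by omega, (slice2_iff s j (by omega)).mpr ⟨hj, he⟩⟩

lemma bPass2_iff (s : String) :
    ((s.toList.zip (PySem.Str.slice s (some 2) none).toList).any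
        (fun ab => ab.1 == ab.2) = true ↔
      ∃ j, j + 2 < s.toList.length ∧ s.toList[j]? = s.toList[j + 2]?) := by
  have hn : s.toList.length = s.length := s.length_toList
  rw [PySem.Str.toList_slice, PySem.Chars.slice_eq_listSlice,
    PySem.List.slice_from _ (by omega : (0:Int) ≤ 2)]
  have e2 : (2 : Int).toNat = 2 := by omega
  rw [e2, List.any_eq_true]
  have hzl : (s.toList.zip (List.drop 2 s.toList)).length
      = min s.toList.length (s.toList.length - 2) := by
    rw [List.length_zip, List.length_drop]
  constructor
  · rintro ⟨ab, hmem, hf⟩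
    obtain ⟨i, hi, hget⟩ := List.mem_iff_getElem.mp hmem
    have hi2 : i + 2 < s.toList.length := by omega
    refine ⟨i, hi2, ?_⟩
    rw [← hget] at hf
    rw [List.getElem_zip] at hf
    simp only [beq_iff_eq, List.getElem_drop] at hf
    simp only [show 2 + i = i + 2 from by omega] at hf
    rw [List.getElem?_eq_getElem (by omega), List.getElem?_eq_getElem hi2]
    exact congrArg some hf
  · rintro ⟨j, hj, he⟩
    have hjz : j < (s.toList.zip (List.drop 2 s.toList)).length := by omega
    refine ⟨(s.toList.zip (List.drop 2 s.toList))[j], List.mem_iff_getElem.mpr ⟨j, hjz, rfl⟩, ?_⟩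
    rw [List.getElem_zip]
    simp only [beq_iff_eq, List.getElem_drop]
    simp only [show 2 + j = j + 2 from by omega]
    rw [List.getElem?_eq_getElem (by omega), List.getElem?_eq_getElem (by omega : j + 2 < s.toList.length)] at he
    exact Option.some_inj.mp he

-- ===== VERDICT (by name: the statement is the Claim_ definition above) =====
theorem validate_v2_spec : Claim_equal_validate_v2 := by
  unfold Claim_equal_validate_v2
  intro s k _
  unfold Spec_validate_v2 validate_v2 validate_v2_alt
  simp only []
  have hn : s.toList.length = s.length := s.length_toList
  have hA1 := aLoop1_iff s k s.length s.length 0 (by omega)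
  have hA2 := aPass2_iff s
  have hB2 := bPass2_iff s
  have e2 : validate_v2_loop2 s s.length 0
      = (s.toList.zip (PySem.Str.slice s (some 2) none).toList).any (fun ab => ab.1 == ab.2) := by
    rw [Bool.eq_iff_iff, hA2, hB2]
  by_cases hn0 : s.toList.length = 0
  · -- empty string: both sides are false (check 2 can never fire)
    have hz : (s.toList.zip (PySem.Str.slice s (some 2) none).toList).any
        (fun ab => ab.1 == ab.2) = false := by
      have : s.toList = [] := List.eq_nil_of_length_eq_zero hn0
      rw [this]
      simp
    have hl2 : validate_v2_loop2 s s.length 0 = false := by rw [e2, hz]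
    rw [hz, hl2, Bool.and_false]
    cases validate_v2_loop1 s k s.length 0 <;> simp
  · by_cases hk : 1 ≤ k
    · by_cases hroom : 2 * k ≤ (s.length : Int)
      · rw [if_pos (Or.inr hroom)]
        have e1 : validate_v2_loop1 s k s.length 0
            = validate_v2_alt_loop s k ((s.length : Int) - k + 1) 0 PySem.Dict.empty := by
          rw [Bool.eq_iff_iff, hA1, bPass_iff_P1 s k hk, ← exists_C1_iff_P1 s k hk]
          constructor
          · rintro ⟨j, _, hj, hc⟩; exact ⟨j, by omega, hc⟩
          · rintro ⟨j, hj, hc⟩; exact ⟨j, by omega, by omega, hc⟩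
        rw [e1, e2]
        cases validate_v2_alt_loop s k ((s.length : Int) - k + 1) 0 PySem.Dict.empty <;> simp
      · have hA1f : validate_v2_loop1 s k s.length 0 = false := by
          rw [Bool.eq_false_iff, Ne, hA1]
          rintro ⟨j, _, hj, hc⟩
          have hp1 : vP1 s.toList k.toNat := (exists_C1_iff_P1 s k hk).mp ⟨j, by omega, hc⟩
          obtain ⟨p, q, c1, c2, c3, _⟩ := hp1
          omega
        rw [hA1f, if_neg (Bool.false_ne_true),
          if_neg (show ¬(k ≤ 0 ∨ 2 * k ≤ (s.length : Int)) by rintro (h | h) <;> omega),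
          Bool.false_and]
    · rw [if_pos (Or.inl (by omega))]
      have hA1t : validate_v2_loop1 s k s.length 0 = true := by
        rw [hA1]
        obtain ⟨j, hj, hc⟩ := aPass_true_of_nonpos s k (by omega) (by omega)
        exact ⟨j, by omega, by omega, hc⟩
      have hB1t := bPass_true_of_nonpos s k (by omega) (by omega)
      rw [hA1t, hB1t, if_pos rfl, Bool.true_and, e2]
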